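-- pv_equiv track=rewrite | github.com/JiminiiiKim/Programmers | Python/[프로그래머스] 리코쳇 로봇.py | bfs
-- ===== SOURCE A (Python) =====
-- from collections import deque
--
-- def bfs(board):
--     dx = [-1, 1, 0, 0]
--     dy = [0, 0, -1, 1]
--     n, m = len(board), len(board[0])
--
--     for i in range(n) :
--         for j in range(m) :
--             if board[i][j] == 'R' :
--                 start_x, start_y = i, j
--
--     # 응용 포인트1: (좌표x, 좌표y, [경로])
--     visited = [[float("inf")]*m for _ in range(n)]
--     queue = deque([(start_x, start_y, 0)])
--     visited[start_x][start_y] = 0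
--
--     while queue :
--         x, y, d = queue.popleft()
--
--         # 응용 포인트2: 문제에서 제시하는 종료 조건
--         if board[x][y] == 'G' :
--             return d
--
--         for i in range(4):
--             nx = x + dx[i]
--             ny = y + dy[i]
--             while 0 <= nx < n and 0 <= ny < m and board[nx][ny] != 'D' :
--                 nx += dx[i]
--                 ny += dy[i]
--             nx -= dx[i]
--             ny -= dy[i]
--             if visited[nx][ny] > d+1 :
--                 visited[nx][ny] = d+1
--                 queue.append((nx, ny, d+1))
--
--     return -1
-- ===== SOURCE B (Python) =====
-- from collections import deque
--
-- def bfs(board):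
--     # Precompute, by linear scans, where a slide from each cell stops in each
--     # direction; then run a plain BFS over that precomputed graph.
--     n, m = len(board), len(board[0])
--     rows = [board[i][:m] for i in range(n)]
--     cols = [''.join(rows[i][j] for i in range(n)) for j in range(m)]
--
--     def fwd(line):
--         # stop index after sliding toward index 0 from just left of each cell
--         s, out = 0, []
--         for j, c in enumerate(line):
--             if c == 'D':
--                 s = j + 1
--             out.append(s)
--         return out
--
--     def bwd(line):
--         # mirror image of fwd: slide toward the last index
--         k = len(line)
--         return [k - 1 - v for v in reversed(fwd(line[::-1]))]
--
--     L = [fwd(r) for r in rows]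
--     Rt = [bwd(r) for r in rows]
--     U = [fwd(c) for c in cols]    # indexed U[j][i]
--     Dn = [bwd(c) for c in cols]
--
--     start = None
--     for i in range(n):
--         for j in range(m):
--             if board[i][j] == 'R':
--                 start = (i, j)
--     sx, sy = start
--     dist = {(sx, sy): 0}
--     queue = deque([(sx, sy)])
--     while queue:
--         x, y = queue.popleft()
--         if rows[x][y] == 'G':
--             return dist[(x, y)]
--         for nxt in ((U[y][x], y), (Dn[y][x], y), (x, L[x][y]), (x, Rt[x][y])):
--             if nxt not in dist:
--                 dist[nxt] = dist[(x, y)] + 1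
--                 queue.append(nxt)
--     return -1
-- ===== Notes on version B (the rewrite author's own statement) =====
-- stated objective: alternative
-- what changed: A re-simulates the cell-by-cell slide for every popped cell and direction inside the BFS loop; B instead precomputes, by one linear scan per row/column (and its mirror), a stop-cell table for all four directions and then runs a plain table-lookup BFS over that precomputed graph, tracking distances in a dict instead of an inf-matrix with a distance-improvement guard.
import Mathlib
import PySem

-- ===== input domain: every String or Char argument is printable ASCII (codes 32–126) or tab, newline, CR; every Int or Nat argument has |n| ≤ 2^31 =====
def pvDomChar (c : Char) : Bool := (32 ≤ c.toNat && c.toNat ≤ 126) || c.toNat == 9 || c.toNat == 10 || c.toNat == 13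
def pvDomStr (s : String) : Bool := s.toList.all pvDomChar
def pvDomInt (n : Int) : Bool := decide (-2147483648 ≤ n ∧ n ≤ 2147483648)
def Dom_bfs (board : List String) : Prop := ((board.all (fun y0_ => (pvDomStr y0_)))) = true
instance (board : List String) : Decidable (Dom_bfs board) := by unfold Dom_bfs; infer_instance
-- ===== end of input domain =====

-- B replaces A's slide-re-simulation inside the BFS loop by stop-cell tables precomputed
-- with one linear scan per row/column, then runs a plain table-lookup BFS (alternative
-- decomposition, same results; return value only — neither program mutates its argument).

-- ===== PORT A =====

-- board[i][j] as a total function; every access either port makes is guarded by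
-- explicit 0 ≤ _ < bound checks, where this agrees exactly with Python
def atB (board : List String) (i j : Int) : Char :=
  ((board.getD i.toNat "").toList).getD j.toNat ' '

-- A's inner `while 0 <= nx < n and 0 <= ny < m and board[nx][ny] != 'D'` slide;
-- the fuel passed at the call site strictly exceeds the possible number of iterations
def slideA (board : List String) (n m dxi dyi : Int) : Nat → Int → Int → Int × Int
  | 0, nx, ny => (nx - dxi, ny - dyi)
  | f+1, nx, ny =>
    if 0 ≤ nx ∧ nx < n ∧ 0 ≤ ny ∧ ny < m ∧ atB board nx ny ≠ 'D' then
      slideA board n m dxi dyi f (nx + dxi) (ny + dyi)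
    else (nx - dxi, ny - dyi)

-- dx/dy of A, as direction pairs
def dirsA : List (Int × Int) := [(-1, 0), (1, 0), (0, -1), (0, 1)]

-- A's `if visited[nx][ny] > d+1` push; the float('inf') matrix is represented as a
-- finite map (absent key = inf; only the stored ints are ever compared)
def stepA (d : Int) (st : List (Int × Int × Int) × PySem.Dict (Int × Int) Int)
    (c : Int × Int) : List (Int × Int × Int) × PySem.Dict (Int × Int) Int :=
  if (st.2.get? c).all (fun k => decide (d + 1 < k)) then
    (st.1 ++ [(c.1, c.2, d + 1)], st.2.insert c (d + 1))
  else st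

-- one `for i in range(4)` body of A: slide, then push
def pushA (board : List String) (n m x y d : Int)
    (st : List (Int × Int × Int) × PySem.Dict (Int × Int) Int) (dd : Int × Int) :
    List (Int × Int × Int) × PySem.Dict (Int × Int) Int :=
  stepA d st (slideA board n m dd.1 dd.2 ((n + m).toNat + 2) (x + dd.1) (y + dd.2))

-- A's `while queue` loop; fuel n*m+1 strictly exceeds the number of pops
-- (each cell enters the queue at most once)
def loopA (board : List String) (n m : Int) :
    Nat → List (Int × Int × Int) → PySem.Dict (Int × Int) Int → Int
  | 0, _, _ => -1
  | _+1, [], _ => -1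
  | f+1, (x, y, d) :: q, vis =>
    if atB board x y = 'G' then d
    else
      let st := dirsA.foldl (pushA board n m x y d) (q, vis)
      loopA board n m f st.1 st.2

-- the double scan `for i in range(n): for j in range(m): if board[i][j]=='R'`
-- (textually identical in A and in B)
def findStart (board : List String) (m : Nat) : Option (Int × Int) :=
  (List.range board.length).foldl (fun (acc : Option (Int × Int)) (i : Nat) =>
    (List.range m).foldl (fun (acc2 : Option (Int × Int)) (j : Nat) =>
      if atB board (i : Int) (j : Int) = 'R' then some ((i : Int), (j : Int)) else acc2) acc)
    none

-- m = len(board[0]) (both programs compute it the same way)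
def mNat (board : List String) : Nat := (board.getD 0 "").toList.length

def bfs (board : List String) : Int :=
  match findStart board (mNat board) with
  | none => -1      -- Python: NameError (start never assigned); outside Pre_bfs
  | some s =>
      loopA board (board.length : Int) (mNat board : Int) (board.length * mNat board + 1)
        [(s.1, s.2, 0)] ((PySem.Dict.empty).insert s 0)

-- ===== PORT B =====

-- B's fwd scan: stop index after sliding toward index 0, for each cell of the line
def fwdScan : List Char → Nat → Int → List Int
  | [], _, _ => []
  | c :: rest, j, s =>
    let s' := if c = 'D' then (j : Int) + 1 else s
    s' :: fwdScan rest (j + 1) s'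

-- B's bwd scan: mirror image of fwd
def bwdScan (line : List Char) : List Int :=
  ((fwdScan line.reverse 0 0).reverse).map (fun v => (line.length : Int) - 1 - v)

-- rows = [board[i][:m] for i in range(n)]
def rowsOf (board : List String) : List (List Char) :=
  board.map (fun r => r.toList.take (mNat board))

-- cols = [''.join(rows[i][j] for i in range(n)) for j in range(m)]
def colsOf (board : List String) : List (List Char) :=
  (List.range (mNat board)).map (fun j => (rowsOf board).map (fun r => r.getD j ' '))

def tblL (board : List String) : List (List Int) := (rowsOf board).map (fun r => fwdScan r 0 0)
def tblR (board : List String) : List (List Int) := (rowsOf board).map bwdScan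
def tblU (board : List String) : List (List Int) := (colsOf board).map (fun c => fwdScan c 0 0)
def tblD (board : List String) : List (List Int) := (colsOf board).map bwdScan

-- t[i][j] (always accessed in range)
def tblGet (t : List (List Int)) (i j : Int) : Int := (t.getD i.toNat []).getD j.toNat 0

-- B's push: `if nxt not in dist: dist[nxt] = dist[(x,y)] + 1; queue.append(nxt)`
def stepB (x y : Int) (st : List (Int × Int) × PySem.Dict (Int × Int) Int)
    (c : Int × Int) : List (Int × Int) × PySem.Dict (Int × Int) Int :=
  if st.2.get? c = none then
    (st.1 ++ [c], st.2.insert c ((st.2.get? (x, y)).getD (-1) + 1))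
  else st

-- B's `while queue` loop over the precomputed tables; same fuel bound as A's loop
def loopB (rows : List (List Char)) (U Dn L Rt : List (List Int)) :
    Nat → List (Int × Int) → PySem.Dict (Int × Int) Int → Int
  | 0, _, _ => -1
  | _+1, [], _ => -1
  | f+1, (x, y) :: q, dist =>
    if (rows.getD x.toNat []).getD y.toNat ' ' = 'G' then (dist.get? (x, y)).getD (-1)
    else
      let nbrs : List (Int × Int) :=
        [(tblGet U y x, y), (tblGet Dn y x, y), (x, tblGet L x y), (x, tblGet Rt x y)]
      let st := nbrs.foldl (stepB x y) (q, dist)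
      loopB rows U Dn L Rt f st.1 st.2

def bfs_alt (board : List String) : Int :=
  match findStart board (mNat board) with
  | none => -1      -- Python: TypeError unpacking None; outside Pre_bfs
  | some s =>
      loopB (rowsOf board) (tblU board) (tblD board) (tblL board) (tblR board)
        (board.length * mNat board + 1) [s] ((PySem.Dict.empty).insert s 0)


-- ===== PRECONDITION & SPEC =====

-- Pre_bfs is exactly where Python A returns: a nonempty board whose rows all have at
-- least len(board[0]) characters (shorter rows: IndexError in the start scan) and that
-- contains an 'R' among the first len(board[0]) columns (otherwise: NameError).
def Pre_bfs (board : List String) : Prop :=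
  board ≠ [] ∧
  (∀ r ∈ board, (board.getD 0 "").toList.length ≤ r.toList.length) ∧
  (∃ i ∈ List.range board.length, ∃ j ∈ List.range (board.getD 0 "").toList.length,
     atB board (i : Int) (j : Int) = 'R')
instance (board : List String) : Decidable (Pre_bfs board) := by unfold Pre_bfs; infer_instance

def pvWitness_bfs : List String := ["RG"]

def Spec_bfs (board : List String) (out : Int) : Prop := out = bfs_alt board
instance (board : List String) (out : Int) : Decidable (Spec_bfs board out) := by
  unfold Spec_bfs; infer_instance

-- ===== CLAIM (what is proved, stated in full; the proofs are below) =====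
def Claim_equal_bfs : Prop := ∀ (board : List String), Dom_bfs board → Pre_bfs board → Spec_bfs board (bfs board)

-- ===== LEMMAS AND PROOFS =====

-- value of B's fwd scan at index t, carrying the running state (offset j0, carry s)
def valF : List Char → Nat → Int → Nat → Int
  | [], _, s, _ => s
  | c :: _, j0, s, 0 => if c = 'D' then (j0 : Int) + 1 else s
  | c :: rest, j0, s, t+1 => valF rest (j0 + 1) (if c = 'D' then (j0 : Int) + 1 else s) t

-- the slide-stop recurrence both programs compute: stop value at index t over chars c
def stopO (c : Nat → Char) (j0 : Nat) (s : Int) : Nat → Int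
  | 0 => s
  | t+1 => if c t = 'D' then (j0 : Int) + t + 1 else stopO c j0 s t

lemma fwdScan_length : ∀ (line : List Char) (j0 : Nat) (s : Int),
    (fwdScan line j0 s).length = line.length := by
  intro line
  induction line with
  | nil => intro _ _; rfl
  | cons c rest ih => intro j0 s; simp [fwdScan, ih]

lemma fwdScan_getD : ∀ (line : List Char) (j0 : Nat) (s : Int) (t : Nat), t < line.length →
    (fwdScan line j0 s).getD t 0 = valF line j0 s t := by
  intro line
  induction line with
  | nil => intro _ _ t ht; simp at ht
  | cons c rest ih =>
    intro j0 s t ht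
    cases t with
    | zero => simp [fwdScan, valF]
    | succ t =>
      simp only [fwdScan, valF, List.getD_cons_succ]
      exact ih _ _ t (by simpa using ht)

lemma stopO_cons : ∀ (t : Nat) (ch : Char) (rest : List Char) (j0 : Nat) (s : Int),
    stopO (fun u => rest.getD u ' ') (j0 + 1) (if ch = 'D' then (j0 : Int) + 1 else s) t
      = stopO (fun u => (ch :: rest).getD u ' ') j0 s (t + 1) := by
  intro t
  induction t with
  | zero =>
    intro ch rest j0 s
    simp [stopO]
  | succ t ih =>
    intro ch rest j0 s
    rw [stopO, stopO]
    simp only [List.getD_cons_succ]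
    by_cases h : rest.getD t ' ' = 'D'
    · rw [if_pos h, if_pos h]; push_cast; ring
    · rw [if_neg h, if_neg h]; exact ih ch rest j0 s
  
lemma valF_stopO : ∀ (line : List Char) (j0 : Nat) (s : Int) (t : Nat), t < line.length →
    valF line j0 s t =
      if line.getD t ' ' = 'D' then (j0 : Int) + t + 1
      else stopO (fun u => line.getD u ' ') j0 s t := by
  intro line
  induction line with
  | nil => intro _ _ t ht; simp at ht
  | cons c rest ih =>
    intro j0 s t ht
    cases t with
    | zero => simp [valF, stopO]
    | succ t =>
      simp only [valF, List.getD_cons_succ]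
      rw [ih _ _ t (by simpa using ht), ← stopO_cons]
      push_cast
      ring_nf

lemma stopO_congr : ∀ (t : Nat) (c c' : Nat → Char) (j0 : Nat) (s : Int),
    (∀ u, u < t → c u = c' u) → stopO c j0 s t = stopO c' j0 s t := by
  intro t
  induction t with
  | zero => intro _ _ _ _ _; rfl
  | succ t ih =>
    intro c c' j0 s h
    simp only [stopO, h t (by omega)]
    rw [ih c c' j0 s (fun u hu => h u (by omega))]

-- combined lookup form of B's fwd scan
lemma fwdScan_lookup (line : List Char) (t : Nat) (ht : t < line.length) :
    (fwdScan line 0 0).getD t 0 =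
      if line.getD t ' ' = 'D' then (t : Int) + 1
      else stopO (fun u => line.getD u ' ') 0 0 t := by
  rw [fwdScan_getD line 0 0 t ht, valF_stopO line 0 0 t ht]
  norm_num

-- ---- slide characterizations (A side) ----

-- a cell both in range and not 'D' (everything the queue ever holds)
def goodCell (board : List String) (n m : Int) (c : Int × Int) : Prop :=
  0 ≤ c.1 ∧ c.1 < n ∧ 0 ≤ c.2 ∧ c.2 < m ∧ atB board c.1 c.2 ≠ 'D'

lemma slide_good (board : List String) (n m dxi dyi : Int) :
    ∀ (f : Nat) (nx ny : Int), goodCell board n m (nx - dxi, ny - dyi) →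
      goodCell board n m (slideA board n m dxi dyi f nx ny) := by
  intro f
  induction f with
  | zero => intro nx ny h; simpa [slideA] using h
  | succ f ih =>
    intro nx ny h
    simp only [slideA]
    split_ifs with hc
    · have := ih (nx + dxi) (ny + dyi)
      simp only [add_sub_cancel_right] at this
      exact this ⟨hc.1, hc.2.1, hc.2.2.1, hc.2.2.2.1, hc.2.2.2.2⟩
    · exact h

lemma slide_left (board : List String) (n m x : Int)
    (hx0 : 0 ≤ x) (hxn : x < n) :
    ∀ (j f : Nat), j ≤ f → (j : Int) ≤ m →
      slideA board n m 0 (-1) (f + 1) x ((j : Int) - 1)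
        = (x, stopO (fun u => atB board x u) 0 0 j) := by
  intro j
  induction j with
  | zero =>
    intro f _ _
    rw [slideA, if_neg]
    · simp [stopO]
    · intro h
      have := h.2.2.1
      simp at this
  | succ j ih =>
    intro f hf hm
    obtain ⟨f', rfl⟩ : ∃ f', f = f' + 1 := ⟨f - 1, by omega⟩
    have harg : ((j + 1 : Nat) : Int) - 1 = (j : Int) := by push_cast; ring
    rw [harg, slideA]
    by_cases hD : atB board x (j : Int) = 'D'
    · rw [if_neg (fun h => h.2.2.2.2 hD)]
      rw [stopO]
      simp only [hD, if_true, Prod.mk.injEq]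
      constructor <;> push_cast <;> ring
    · rw [if_pos ⟨hx0, hxn, Int.natCast_nonneg j, by push_cast at hm ⊢; omega, hD⟩]
      have harg2 : (j : Int) + (-1) = (j : Int) - 1 := by ring
      rw [add_zero, harg2, ih f' (by omega) (by push_cast at hm ⊢; omega)]
      rw [stopO]
      simp [hD]

lemma slide_up (board : List String) (n m y : Int)
    (hy0 : 0 ≤ y) (hym : y < m) :
    ∀ (i f : Nat), i ≤ f → (i : Int) ≤ n →
      slideA board n m (-1) 0 (f + 1) ((i : Int) - 1) y
        = (stopO (fun u => atB board u y) 0 0 i, y) := by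
  intro i
  induction i with
  | zero =>
    intro f _ _
    rw [slideA, if_neg]
    · simp [stopO]
    · intro h
      have := h.1
      simp at this
  | succ i ih =>
    intro f hf hn
    obtain ⟨f', rfl⟩ : ∃ f', f = f' + 1 := ⟨f - 1, by omega⟩
    have harg : ((i + 1 : Nat) : Int) - 1 = (i : Int) := by push_cast; ring
    rw [harg, slideA]
    by_cases hD : atB board (i : Int) y = 'D'
    · rw [if_neg (fun h => h.2.2.2.2 hD)]
      rw [stopO]
      simp only [hD, if_true, Prod.mk.injEq]
      constructor <;> push_cast <;> ring
    · rw [if_pos ⟨Int.natCast_nonneg i, by push_cast at hn ⊢; omega, hy0, hym, hD⟩]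
      have harg2 : (i : Int) + (-1) = (i : Int) - 1 := by ring
      rw [add_zero, harg2, ih f' (by omega) (by push_cast at hn ⊢; omega)]
      rw [stopO]
      simp [hD]

lemma slide_right (board : List String) (n m x : Int)
    (hx0 : 0 ≤ x) (hxn : x < n) :
    ∀ (k f : Nat), k ≤ f → (k : Int) ≤ m →
      slideA board n m 0 1 (f + 1) x (m - (k : Int))
        = (x, m - 1 - stopO (fun u => atB board x (m - 1 - u)) 0 0 k) := by
  intro k
  induction k with
  | zero =>
    intro f _ _
    rw [slideA, if_neg]
    · simp [stopO]
    · intro h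
      have := h.2.2.2.1
      push_cast at this
      omega
  | succ k ih =>
    intro f hf hm
    obtain ⟨f', rfl⟩ : ∃ f', f = f' + 1 := ⟨f - 1, by omega⟩
    have harg : m - ((k + 1 : Nat) : Int) = m - 1 - (k : Int) := by push_cast; ring
    rw [harg, slideA]
    by_cases hD : atB board x (m - 1 - (k : Int)) = 'D'
    · rw [if_neg (fun h => h.2.2.2.2 hD)]
      rw [stopO]
      simp only [hD, if_true, Prod.mk.injEq]
      constructor <;> push_cast <;> ring
    · rw [if_pos ⟨hx0, hxn, by push_cast at hm ⊢; omega, by push_cast at hm ⊢; omega, hD⟩]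
      have harg2 : m - 1 - (k : Int) + 1 = m - (k : Int) := by ring
      rw [add_zero, harg2, ih f' (by omega) (by push_cast at hm ⊢; omega)]
      rw [stopO]
      simp [hD]

lemma slide_down (board : List String) (n m y : Int)
    (hy0 : 0 ≤ y) (hym : y < m) :
    ∀ (k f : Nat), k ≤ f → (k : Int) ≤ n →
      slideA board n m 1 0 (f + 1) (n - (k : Int)) y
        = (n - 1 - stopO (fun u => atB board (n - 1 - u) y) 0 0 k, y) := by
  intro k
  induction k with
  | zero =>
    intro f _ _
    rw [slideA, if_neg]
    · simp [stopO]
    · intro h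
      have := h.2.1
      push_cast at this
      omega
  | succ k ih =>
    intro f hf hn
    obtain ⟨f', rfl⟩ : ∃ f', f = f' + 1 := ⟨f - 1, by omega⟩
    have harg : n - ((k + 1 : Nat) : Int) = n - 1 - (k : Int) := by push_cast; ring
    rw [harg, slideA]
    by_cases hD : atB board (n - 1 - (k : Int)) y = 'D'
    · rw [if_neg (fun h => h.2.2.2.2 hD)]
      rw [stopO]
      simp only [hD, if_true, Prod.mk.injEq]
      constructor <;> push_cast <;> ring
    · rw [if_pos ⟨by push_cast at hn ⊢; omega, by push_cast at hn ⊢; omega, hy0, hym, hD⟩]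
      have harg2 : n - 1 - (k : Int) + 1 = n - (k : Int) := by ring
      rw [add_zero, harg2, ih f' (by omega) (by push_cast at hn ⊢; omega)]
      rw [stopO]
      simp [hD]

-- ---- bridging: rows/cols of B vs direct board access ----

lemma getD_take_lt {α : Type} [Inhabited α] (l : List α) (k j : Nat) (h : j < k) (d : α) :
    (l.take k).getD j d = l.getD j d := by
  simp only [List.getD]
  rw [List.getElem?_take]
  simp [h]

lemma getD_map_lt {α β : Type} (f : α → β) (l : List α) (i : Nat) (h : i < l.length)
    (d : α) (d' : β) : (l.map f).getD i d' = f (l.getD i d) := by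
  simp only [List.getD, List.getElem?_map]
  rw [List.getElem?_eq_getElem h]
  simp

lemma getD_reverse_lt {α : Type} (l : List α) (j : Nat) (h : j < l.length) (d : α) :
    (l.reverse).getD j d = l.getD (l.length - 1 - j) d := by
  rw [List.getD_eq_getElem _ _ (by simpa using h), List.getD_eq_getElem _ _ (by omega)]
  simp [List.getElem_reverse]

lemma rows_length (board : List String) (i : Nat)
    (hlen : ∀ r ∈ board, mNat board ≤ r.toList.length) (hi : i < board.length) :
    ((rowsOf board).getD i []).length = mNat board := by
  unfold rowsOf
  rw [getD_map_lt _ board i hi ""]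
  have : board.getD i "" ∈ board := by
    rw [List.getD_eq_getElem _ _ hi]; exact List.getElem_mem hi
  rw [List.length_take]
  exact Nat.min_eq_left (hlen _ this)

lemma rows_getD (board : List String) (i j : Nat) (hi : i < board.length)
    (hj : j < mNat board) :
    ((rowsOf board).getD i []).getD j ' ' = atB board (i : Int) (j : Int) := by
  unfold rowsOf atB
  rw [getD_map_lt _ board i hi ""]
  rw [getD_take_lt _ _ _ hj]
  simp

lemma cols_length (board : List String) (j : Nat) (hj : j < mNat board) :
    ((colsOf board).getD j []).length = board.length := by
  unfold colsOf
  rw [getD_map_lt _ _ j (by simpa using hj) 0]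
  simp [rowsOf]

lemma cols_getD (board : List String) (i j : Nat) (hi : i < board.length)
    (hj : j < mNat board) :
    ((colsOf board).getD j []).getD i ' ' = atB board (i : Int) (j : Int) := by
  unfold colsOf
  rw [getD_map_lt _ _ j (by simpa using hj) 0]
  have hr : (List.range (mNat board)).getD j 0 = j := by
    rw [List.getD_eq_getElem _ _ (by simpa using hj)]; simp
  rw [hr, getD_map_lt _ _ i (by simpa [rowsOf] using hi) []]
  exact rows_getD board i j hi hj

-- ---- table lookups (B side) expressed through the slide recurrence ----

lemma tblL_lookup (board : List String) (i j : Nat)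
    (hlen : ∀ r ∈ board, mNat board ≤ r.toList.length)
    (hi : i < board.length) (hj : j < mNat board)
    (hnd : atB board (i : Int) (j : Int) ≠ 'D') :
    tblGet (tblL board) (i : Int) (j : Int)
      = stopO (fun u => atB board (i : Int) (u : Int)) 0 0 j := by
  unfold tblGet tblL
  simp only [Int.toNat_natCast]
  rw [getD_map_lt _ _ i (by simpa [rowsOf] using hi) []]
  have hlenR := rows_length board i hlen hi
  have hjl : j < ((rowsOf board).getD i []).length := by omega
  rw [fwdScan_lookup _ j hjl]
  rw [rows_getD board i j hi hj, if_neg hnd]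
  exact stopO_congr j _ _ 0 0 (fun u hu => by rw [rows_getD board i u hi (by omega)])

lemma tblR_lookup (board : List String) (i j : Nat)
    (hlen : ∀ r ∈ board, mNat board ≤ r.toList.length)
    (hi : i < board.length) (hj : j < mNat board)
    (hnd : atB board (i : Int) (j : Int) ≠ 'D') :
    tblGet (tblR board) (i : Int) (j : Int)
      = (mNat board : Int) - 1
          - stopO (fun u => atB board (i : Int) ((mNat board : Int) - 1 - u)) 0 0
              (mNat board - 1 - j) := by
  unfold tblGet tblR bwdScan
  simp only [Int.toNat_natCast]
  rw [getD_map_lt _ _ i (by simpa [rowsOf] using hi) []]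
  have hlenR := rows_length board i hlen hi
  set row := (rowsOf board).getD i [] with hrow
  rw [getD_map_lt _ _ j (by simp [fwdScan_length, hlenR]; omega) 0]
  rw [getD_reverse_lt _ j (by simp [fwdScan_length, hlenR]; omega) 0]
  have hflen : (fwdScan row.reverse 0 0).length = mNat board := by
    simp [fwdScan_length, hlenR]
  rw [hflen]
  have ht : mNat board - 1 - j < row.reverse.length := by simp [hlenR]; omega
  rw [fwdScan_lookup _ _ ht]
  have hrevget : ∀ u, u < mNat board →
      row.reverse.getD u ' ' = atB board (i : Int) ((mNat board - 1 - u : Nat) : Int) := by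
    intro u hu
    rw [getD_reverse_lt _ u (by omega) ' ', hlenR]
    exact rows_getD board i (mNat board - 1 - u) hi (by omega)
  rw [hrevget (mNat board - 1 - j) (by omega)]
  have hjj : mNat board - 1 - (mNat board - 1 - j) = j := by omega
  rw [hjj, if_neg hnd]
  have := stopO_congr (mNat board - 1 - j)
      (fun u => row.reverse.getD u ' ')
      (fun u => atB board (i : Int) ((mNat board : Int) - 1 - u)) 0 0
      (fun u hu => by
        show row.reverse.getD u ' ' = atB board (i : Int) ((mNat board : Int) - 1 - (u : Int))
        rw [hrevget u (by omega)]
        congr 1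
        omega)
  rw [this]
  congr 1
  simp [hlenR]

lemma tblU_lookup (board : List String) (i j : Nat)
    (hi : i < board.length) (hj : j < mNat board)
    (hnd : atB board (i : Int) (j : Int) ≠ 'D') :
    tblGet (tblU board) (j : Int) (i : Int)
      = stopO (fun u => atB board (u : Int) (j : Int)) 0 0 i := by
  unfold tblGet tblU
  simp only [Int.toNat_natCast]
  rw [getD_map_lt _ _ j (by simpa [colsOf] using hj) []]
  have hlenC := cols_length board j hj
  rw [fwdScan_lookup _ i (by omega)]
  rw [cols_getD board i j hi hj, if_neg hnd]
  exact stopO_congr i _ _ 0 0 (fun u hu => by rw [cols_getD board u j (by omega) hj])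

lemma tblD_lookup (board : List String) (i j : Nat)
    (hi : i < board.length) (hj : j < mNat board)
    (hnd : atB board (i : Int) (j : Int) ≠ 'D') :
    tblGet (tblD board) (j : Int) (i : Int)
      = (board.length : Int) - 1
          - stopO (fun u => atB board ((board.length : Int) - 1 - u) (j : Int)) 0 0
              (board.length - 1 - i) := by
  unfold tblGet tblD bwdScan
  simp only [Int.toNat_natCast]
  rw [getD_map_lt _ _ j (by simpa [colsOf] using hj) []]
  have hlenC := cols_length board j hj
  set col := (colsOf board).getD j [] with hcol
  rw [getD_map_lt _ _ i (by simp [fwdScan_length, hlenC]; omega) 0]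
  rw [getD_reverse_lt _ i (by simp [fwdScan_length, hlenC]; omega) 0]
  have hflen : (fwdScan col.reverse 0 0).length = board.length := by
    simp [fwdScan_length, hlenC]
  rw [hflen]
  have ht : board.length - 1 - i < col.reverse.length := by simp [hlenC]; omega
  rw [fwdScan_lookup _ _ ht]
  have hrevget : ∀ u, u < board.length →
      col.reverse.getD u ' ' = atB board ((board.length - 1 - u : Nat) : Int) (j : Int) := by
    intro u hu
    rw [getD_reverse_lt _ u (by omega) ' ', hlenC]
    exact cols_getD board (board.length - 1 - u) j (by omega) hj
  rw [hrevget (board.length - 1 - i) (by omega)]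
  have hii : board.length - 1 - (board.length - 1 - i) = i := by omega
  rw [hii, if_neg hnd]
  have := stopO_congr (board.length - 1 - i)
      (fun u => col.reverse.getD u ' ')
      (fun u => atB board ((board.length : Int) - 1 - u) (j : Int)) 0 0
      (fun u hu => by
        show col.reverse.getD u ' ' = atB board ((board.length : Int) - 1 - (u : Int)) (j : Int)
        rw [hrevget u (by omega)]
        congr 1
        omega)
  rw [this]
  congr 1
  simp [hlenC]

-- ---- the four neighbours coincide ----

lemma nbr_eq (board : List String)
    (hlen : ∀ r ∈ board, mNat board ≤ r.toList.length) (x y : Int)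
    (hg : goodCell board (board.length : Int) (mNat board : Int) (x, y)) :
    [(tblGet (tblU board) y x, y), (tblGet (tblD board) y x, y),
     (x, tblGet (tblL board) x y), (x, tblGet (tblR board) x y)]
      = dirsA.map (fun dd =>
          slideA board (board.length : Int) (mNat board : Int) dd.1 dd.2
            (((board.length : Int) + (mNat board : Int)).toNat + 2) (x + dd.1) (y + dd.2)) := by
  obtain ⟨hx0, hxn, hy0, hym, hnd⟩ := hg
  lift x to Nat using hx0 with i
  lift y to Nat using hy0 with j
  have hi : i < board.length := by exact_mod_cast hxn
  have hj : j < mNat board := by exact_mod_cast hym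
  have hF : ((board.length : Int) + (mNat board : Int)).toNat + 2
      = (board.length + mNat board + 1) + 1 := by omega
  simp only [dirsA, List.map_cons, List.map_nil, hF]
  rw [show (i : Int) + (-1, (0:Int)).1 = (i : Int) - 1 by simp; ring]
  rw [show (j : Int) + (-1, (0:Int)).2 = (j : Int) by simp]
  rw [show (i : Int) + ((1:Int), (0:Int)).1 = (board.length : Int) - ((board.length - 1 - i : Nat) : Int) by simp; omega]
  rw [show (i : Int) + (0 : Int) = (i : Int) by ring]
  rw [show (j : Int) + (-1 : Int) = (j : Int) - 1 by ring]
  rw [show (j : Int) + (1 : Int) = (mNat board : Int) - ((mNat board - 1 - j : Nat) : Int) by omega]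
  rw [slide_up board _ _ _ (by positivity) (by exact_mod_cast hym) i (board.length + mNat board + 1)
        (by omega) (by exact_mod_cast Nat.le_of_lt hi)]
  rw [slide_down board _ _ _ (by positivity) (by exact_mod_cast hym) (board.length - 1 - i)
        (board.length + mNat board + 1) (by omega) (by exact_mod_cast Nat.sub_le _ _ |>.trans (by omega))]
  rw [slide_left board _ _ _ (by positivity) (by exact_mod_cast hxn) j (board.length + mNat board + 1)
        (by omega) (by exact_mod_cast Nat.le_of_lt hj)]
  rw [slide_right board _ _ _ (by positivity) (by exact_mod_cast hxn) (mNat board - 1 - j)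
        (board.length + mNat board + 1) (by omega) (by exact_mod_cast Nat.sub_le _ _ |>.trans (by omega))]
  rw [tblU_lookup board i j hi hj hnd, tblD_lookup board i j hi hj hnd,
      tblL_lookup board i j hlen hi hj hnd, tblR_lookup board i j hlen hi hj hnd]

-- ---- simulation of one pop's push loop ----

lemma fold_sim (x y d : Int) :
    ∀ (cs : List (Int × Int)) (qA : List (Int × Int × Int)) (vis : PySem.Dict (Int × Int) Int),
      vis.get? (x, y) = some d →
      (∀ k v, vis.get? k = some v → v ≤ d + 1) →
      ∃ new : List (Int × Int),
        (cs.foldl (stepA d) (qA, vis)).1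
            = qA ++ new.map (fun c => (c.1, c.2, d + 1)) ∧
        cs.foldl (stepB x y) (qA.map (fun e => (e.1, e.2.1)), vis)
            = (qA.map (fun e => (e.1, e.2.1)) ++ new, (cs.foldl (stepA d) (qA, vis)).2) ∧
        (∀ c ∈ new, c ∈ cs) ∧
        (∀ k v, vis.get? k = some v → (cs.foldl (stepA d) (qA, vis)).2.get? k = some v) ∧
        (∀ k v, (cs.foldl (stepA d) (qA, vis)).2.get? k = some v → v ≤ d + 1) ∧
        (∀ c ∈ new, (cs.foldl (stepA d) (qA, vis)).2.get? c = some (d + 1)) := by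
  intro cs
  induction cs with
  | nil =>
    intro qA vis h1 h2
    exact ⟨[], by simp, by simp, by simp, fun k v h => h, h2, by simp⟩
  | cons c cs ih =>
    intro qA vis h1 h2
    simp only [List.foldl_cons]
    by_cases hc : vis.get? c = none
    · have hne : (x, y) ≠ c := by
        intro h; rw [← h, h1] at hc; simp at hc
      have hA : stepA d (qA, vis) c = (qA ++ [(c.1, c.2, d + 1)], vis.insert c (d + 1)) := by
        simp [stepA, hc]
      have hB : stepB x y (qA.map (fun e => (e.1, e.2.1)), vis) c
          = (qA.map (fun e => (e.1, e.2.1)) ++ [c], vis.insert c (d + 1)) := by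
        simp [stepB, hc, h1]
      rw [hA, hB]
      have h1' : (vis.insert c (d + 1)).get? (x, y) = some d := by
        rw [PySem.Dict.get?_insert]
        rw [if_neg hne]
        exact h1
      have h2' : ∀ k v, (vis.insert c (d + 1)).get? k = some v → v ≤ d + 1 := by
        intro k v hkv
        rw [PySem.Dict.get?_insert] at hkv
        split_ifs at hkv with h
        · injection hkv with h'; omega
        · exact h2 k v hkv
      obtain ⟨new, hq, hB2, hsub, hext, hbound, hnew⟩ :=
        ih (qA ++ [(c.1, c.2, d + 1)]) (vis.insert c (d + 1)) h1' h2'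
      have hmap : (qA ++ [(c.1, c.2, d + 1)]).map (fun e => (e.1, e.2.1))
          = qA.map (fun e => (e.1, e.2.1)) ++ [c] := by
        simp
      refine ⟨c :: new, ?_, ?_, ?_, ?_, hbound, ?_⟩
      · rw [hq]; simp
      · rw [hmap] at hB2
        rw [hB2]
        simp
      · intro c' hc'
        rcases List.mem_cons.mp hc' with h | h
        · exact h ▸ List.mem_cons_self ..
        · exact List.mem_cons_of_mem _ (hsub c' h)
      · intro k v hkv
        refine hext k v ?_
        rw [PySem.Dict.get?_insert]
        rw [if_neg ?_]
        · exact hkv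
        · intro h; rw [h, hc] at hkv; simp at hkv
      · intro c' hc'
        rcases List.mem_cons.mp hc' with h | h
        · subst h
          exact hext _ _ (PySem.Dict.get?_insert_self _ _ _)
        · exact hnew c' h
    · obtain ⟨k0, hk0⟩ := Option.ne_none_iff_exists'.mp hc
      have hb : k0 ≤ d + 1 := h2 _ _ hk0
      have hA : stepA d (qA, vis) c = (qA, vis) := by
        have hcond : ((vis.get? c).all (fun k => decide (d + 1 < k))) = false := by
          rw [hk0]; simp; omega
        simp [stepA, hcond]
      have hB : stepB x y (qA.map (fun e => (e.1, e.2.1)), vis) c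
          = (qA.map (fun e => (e.1, e.2.1)), vis) := by
        simp [stepB, hk0]
      rw [hA, hB]
      obtain ⟨new, hq, hB2, hsub, hext, hbound, hnew⟩ := ih qA vis h1 h2
      exact ⟨new, hq, hB2, fun c' h => List.mem_cons_of_mem _ (hsub c' h), hext, hbound, hnew⟩

-- ---- the joint BFS invariant and the loop simulation ----

def InvA (board : List String) (q : List (Int × Int × Int))
    (vis : PySem.Dict (Int × Int) Int) : Prop :=
  (∀ e ∈ q, vis.get? (e.1, e.2.1) = some e.2.2) ∧
  List.Pairwise (· ≤ ·) (q.map (fun e => e.2.2)) ∧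
  (∀ k v, vis.get? k = some v → ∀ e ∈ q, v ≤ e.2.2 + 1) ∧
  (∀ e ∈ q, goodCell board (board.length : Int) (mNat board : Int) (e.1, e.2.1))

lemma pairwise_map_const {α : Type} (l : List α) (c : Int) :
    List.Pairwise (· ≤ ·) (l.map fun _ => c) := by
  induction l with
  | nil => simp
  | cons a l ih =>
    simp only [List.map_cons, List.pairwise_cons]
    exact ⟨fun b hb => by rcases List.mem_map.mp hb with ⟨_, _, rfl⟩; exact le_refl c, ih⟩

lemma rows_getD' (board : List String) (x y : Int) (hx0 : 0 ≤ x)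
    (hxn : x < (board.length : Int)) (hy0 : 0 ≤ y) (hym : y < (mNat board : Int)) :
    ((rowsOf board).getD x.toNat []).getD y.toNat ' ' = atB board x y := by
  have := rows_getD board x.toNat y.toNat (by omega) (by omega)
  rwa [Int.toNat_of_nonneg hx0, Int.toNat_of_nonneg hy0] at this

lemma loop_sim (board : List String)
    (hlen : ∀ r ∈ board, mNat board ≤ r.toList.length) :
    ∀ (f : Nat) (q : List (Int × Int × Int)) (vis : PySem.Dict (Int × Int) Int),
      InvA board q vis →
      loopA board (board.length : Int) (mNat board : Int) f q vis
        = loopB (rowsOf board) (tblU board) (tblD board) (tblL board) (tblR board) f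
            (q.map (fun e => (e.1, e.2.1))) vis := by
  intro f
  induction f with
  | zero => intro q vis _; rfl
  | succ f ih =>
    intro q vis hInv
    match q with
    | [] => rfl
    | (x, y, d) :: q' =>
      obtain ⟨h1, h2, h3, h4⟩ := hInv
      have hq1 : vis.get? (x, y) = some d := h1 (x, y, d) (List.mem_cons_self ..)
      have hgood : goodCell board (board.length : Int) (mNat board : Int) (x, y) :=
        h4 (x, y, d) (List.mem_cons_self ..)
      obtain ⟨hx0, hxn, hy0, hym, hnd⟩ := hgood
      simp only [List.map_cons, loopA, loopB]
      rw [rows_getD' board x y hx0 hxn hy0 hym]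
      by_cases hG : atB board x y = 'G'
      · rw [if_pos hG, if_pos hG, hq1]
        rfl
      · rw [if_neg hG, if_neg hG]
        simp only [List.map_cons] at h2
        obtain ⟨hhead, htail⟩ := List.pairwise_cons.mp h2
        have hfoldA : dirsA.foldl (pushA board (board.length : Int) (mNat board : Int) x y d) (q', vis)
            = (dirsA.map (fun dd =>
                slideA board (board.length : Int) (mNat board : Int) dd.1 dd.2
                  (((board.length : Int) + (mNat board : Int)).toNat + 2) (x + dd.1) (y + dd.2))).foldl
                (stepA d) (q', vis) := by
          rw [List.foldl_map]
          rfl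
        have hb2 : ∀ k v, vis.get? k = some v → v ≤ d + 1 :=
          fun k v h => h3 k v h (x, y, d) (List.mem_cons_self ..)
        obtain ⟨new, hq, hB2, hsub, hext, hbound, hnew⟩ :=
          fold_sim x y d (dirsA.map (fun dd =>
            slideA board (board.length : Int) (mNat board : Int) dd.1 dd.2
              (((board.length : Int) + (mNat board : Int)).toNat + 2) (x + dd.1) (y + dd.2)))
            q' vis hq1 hb2
        rw [nbr_eq board hlen x y ⟨hx0, hxn, hy0, hym, hnd⟩, hB2, hfoldA, hq]
        have hnewGood : ∀ c ∈ new,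
            goodCell board (board.length : Int) (mNat board : Int) c := by
          intro c hc
          rcases List.mem_map.mp (hsub c hc) with ⟨dd, _, rfl⟩
          apply slide_good
          simpa using ⟨hx0, hxn, hy0, hym, hnd⟩
        have hInv' : InvA board (q' ++ new.map (fun c => (c.1, c.2, d + 1)))
            ((dirsA.map (fun dd =>
              slideA board (board.length : Int) (mNat board : Int) dd.1 dd.2
                (((board.length : Int) + (mNat board : Int)).toNat + 2) (x + dd.1) (y + dd.2))).foldl
              (stepA d) (q', vis)).2 := by
          refine ⟨?_, ?_, ?_, ?_⟩
          · intro e he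
            rcases List.mem_append.mp he with h | h
            · exact hext _ _ (h1 e (List.mem_cons_of_mem _ h))
            · rcases List.mem_map.mp h with ⟨c, hc, rfl⟩
              exact hnew c hc
          · rw [List.map_append]
            rw [List.pairwise_append]
            refine ⟨htail, ?_, ?_⟩
            · rw [List.map_map]
              have hcomp : ((fun (e : Int × Int × Int) => e.2.2)
                  ∘ (fun (c : Int × Int) => (c.1, c.2, d + 1))) = fun _ => d + 1 := rfl
              rw [hcomp]
              exact pairwise_map_const new (d + 1)
            · intro a ha b hb
              rcases List.mem_map.mp ha with ⟨e, he, rfl⟩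
              rcases List.mem_map.mp hb with ⟨e', he', rfl⟩
              rcases List.mem_map.mp he' with ⟨c, hc, rfl⟩
              have := h3 _ _ (h1 e (List.mem_cons_of_mem _ he)) (x, y, d) (List.mem_cons_self ..)
              simpa using this
          · intro k v hv e he
            have hvd : v ≤ d + 1 := hbound k v hv
            rcases List.mem_append.mp he with h | h
            · have hd_le : d ≤ e.2.2 := hhead e.2.2 (List.mem_map.mpr ⟨e, h, rfl⟩)
              omega
            · rcases List.mem_map.mp h with ⟨c, hc, rfl⟩
              simp only
              omega
          · intro e he
            rcases List.mem_append.mp he with h | h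
            · exact h4 e (List.mem_cons_of_mem _ h)
            · rcases List.mem_map.mp h with ⟨c, hc, rfl⟩
              exact hnewGood c hc
        rw [ih _ _ hInv']
        congr 1
        have hcomp2 : ((fun (e : Int × Int × Int) => (e.1, e.2.1))
            ∘ (fun (c : Int × Int) => (c.1, c.2, d + 1))) = id := rfl
        simp [List.map_map, hcomp2]

-- ---- the start scan ----

def startGood (board : List String) (o : Option (Int × Int)) : Prop :=
  ∀ s : Int × Int, o = some s →
    0 ≤ s.1 ∧ s.1 < (board.length : Int) ∧ 0 ≤ s.2 ∧ s.2 < (mNat board : Int) ∧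
    atB board s.1 s.2 = 'R'

lemma inner_good (board : List String) (i : Nat) (hi : i < board.length) :
    ∀ (l : List Nat) (acc : Option (Int × Int)), (∀ j ∈ l, j < mNat board) →
      startGood board acc →
      startGood board (l.foldl (fun (acc2 : Option (Int × Int)) (j : Nat) =>
        if atB board (i : Int) (j : Int) = 'R' then some ((i : Int), (j : Int)) else acc2) acc) := by
  intro l
  induction l with
  | nil => intro acc _ hacc; exact hacc
  | cons j l ihl =>
    intro acc hl hacc
    rw [List.foldl_cons]
    refine ihl _ (fun j' hj' => hl j' (List.mem_cons_of_mem _ hj')) ?_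
    intro s hs
    split_ifs at hs with hR
    · cases hs
      refine ⟨by positivity, ?_, by positivity, ?_, hR⟩
      · show (i : Int) < (board.length : Int)
        exact_mod_cast hi
      · show (j : Int) < (mNat board : Int)
        exact_mod_cast hl j (List.mem_cons_self ..)
    · exact hacc s hs

lemma outer_good (board : List String) :
    ∀ (l : List Nat) (acc : Option (Int × Int)), (∀ i ∈ l, i < board.length) →
      startGood board acc →
      startGood board (l.foldl (fun (acc : Option (Int × Int)) (i : Nat) =>
        (List.range (mNat board)).foldl (fun (acc2 : Option (Int × Int)) (j : Nat) =>
          if atB board (i : Int) (j : Int) = 'R' then some ((i : Int), (j : Int)) else acc2) acc) acc) := by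
  intro l
  induction l with
  | nil => intro acc _ hacc; exact hacc
  | cons i l ihl =>
    intro acc hl hacc
    rw [List.foldl_cons]
    refine ihl _ (fun i' hi' => hl i' (List.mem_cons_of_mem _ hi')) ?_
    exact inner_good board i (hl i (List.mem_cons_self ..)) _ acc
      (fun j hj => List.mem_range.mp hj) hacc

lemma inner_none (board : List String) (i : Nat) :
    ∀ (l : List Nat) (acc : Option (Int × Int)),
      l.foldl (fun (acc2 : Option (Int × Int)) (j : Nat) =>
        if atB board (i : Int) (j : Int) = 'R' then some ((i : Int), (j : Int)) else acc2) acc = none →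
      acc = none ∧ ∀ j ∈ l, atB board (i : Int) (j : Int) ≠ 'R' := by
  intro l
  induction l with
  | nil => intro acc h; exact ⟨h, by intro a ha; simp at ha⟩
  | cons j l ihl =>
    intro acc h
    rw [List.foldl_cons] at h
    obtain ⟨hstep, hrest⟩ := ihl _ h
    by_cases hR : atB board (i : Int) (j : Int) = 'R'
    · rw [if_pos hR] at hstep
      cases hstep
    · rw [if_neg hR] at hstep
      refine ⟨hstep, ?_⟩
      intro j' hj'
      rcases List.mem_cons.mp hj' with rfl | hj'
      · exact hR
      · exact hrest j' hj'

lemma outer_none (board : List String) :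
    ∀ (l : List Nat) (acc : Option (Int × Int)),
      l.foldl (fun (acc : Option (Int × Int)) (i : Nat) =>
        (List.range (mNat board)).foldl (fun (acc2 : Option (Int × Int)) (j : Nat) =>
          if atB board (i : Int) (j : Int) = 'R' then some ((i : Int), (j : Int)) else acc2) acc) acc = none →
      acc = none ∧ ∀ i ∈ l, ∀ j ∈ List.range (mNat board), atB board (i : Int) (j : Int) ≠ 'R' := by
  intro l
  induction l with
  | nil => intro acc h; exact ⟨h, by intro a ha; simp at ha⟩
  | cons i l ihl =>
    intro acc h
    rw [List.foldl_cons] at h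
    obtain ⟨hstep, hrest⟩ := ihl _ h
    obtain ⟨hacc, hrow⟩ := inner_none board i _ acc hstep
    refine ⟨hacc, ?_⟩
    intro i' hi'
    rcases List.mem_cons.mp hi' with rfl | hi'
    · exact hrow
    · exact hrest i' hi'

lemma findStart_spec (board : List String) (hpre : Pre_bfs board) :
    ∃ s : Int × Int, findStart board (mNat board) = some s ∧
      0 ≤ s.1 ∧ s.1 < (board.length : Int) ∧ 0 ≤ s.2 ∧ s.2 < (mNat board : Int) ∧
      atB board s.1 s.2 = 'R' := by
  obtain ⟨-, -, i, hi, j, hj, hR⟩ := hpre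
  have hne : findStart board (mNat board) ≠ none := by
    intro h
    unfold findStart at h
    obtain ⟨-, hall⟩ := outer_none board (List.range board.length) none h
    exact hall i hi j hj hR
  obtain ⟨s, hs⟩ := Option.ne_none_iff_exists'.mp hne
  have hgood := outer_good board (List.range board.length) none
    (fun i hi => List.mem_range.mp hi) (fun s h => by simp at h)
  refine ⟨s, hs, hgood s ?_⟩
  unfold findStart at hs
  exact hs

-- ===== VERDICT (by name: the statement is the Claim_ definition above) =====
theorem bfs_spec : Claim_equal_bfs := by
  intro board _ hpre
  unfold Spec_bfs bfs bfs_alt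
  obtain ⟨s, hs, hs1, hs2, hs3, hs4, hR⟩ := findStart_spec board hpre
  rw [hs]
  have hlen : ∀ r ∈ board, mNat board ≤ r.toList.length := hpre.2.1
  have hInv : InvA board [(s.1, s.2, 0)] ((PySem.Dict.empty).insert s 0) := by
    refine ⟨?_, by simp, ?_, ?_⟩
    · intro e he
      simp at he
      subst he
      exact PySem.Dict.get?_insert_self _ _ _
    · intro k v hkv e he
      simp at he
      subst he
      rw [PySem.Dict.get?_insert] at hkv
      split_ifs at hkv with h
      · injection hkv with h'
        show v ≤ 0 + 1
        omega
      · rw [PySem.Dict.get?_empty] at hkv; cases hkv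
    · intro e he
      simp at he
      subst he
      exact ⟨hs1, hs2, hs3, hs4, by rw [hR]; decide⟩
  have := loop_sim board hlen (board.length * mNat board + 1)
    [(s.1, s.2, 0)] ((PySem.Dict.empty).insert s 0) hInv
  simpa using this
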